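-- pv_equiv track=rewrite | github.com/roinergaon/Car-Dealer-Lead-Processing-Automation | car_models.py | parse_car_entry
-- ===== SOURCE A (Python) =====
-- def parse_car_entry(entry: str) -> dict:
--     def extract(field):
--         for line in entry.splitlines():
--             if line.startswith(field + ":"):
--                 return line.split(":", 1)[1].strip()
--         return None
--
--     return {
--         "model_name": extract("Model"),
--         "category": extract("Category"),
--         "price_range": extract("Price Range"),
--         "availability": extract("Availability")
--     }
-- ===== SOURCE B (Python) =====
-- def parse_car_entry(entry: str) -> dict:
--     index = {}
--     for line in entry.splitlines():
--         key, sep, rest = line.partition(":")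
--         if sep and key not in index:
--             index[key] = rest.strip()
--     return {
--         "model_name": index.get("Model"),
--         "category": index.get("Category"),
--         "price_range": index.get("Price Range"),
--         "availability": index.get("Availability"),
--     }
-- ===== Notes on version B (the rewrite author's own statement) =====
-- stated objective: simpler
-- what changed: Replaces A's four separate scans (each re-splitting the entry and re-testing startswith per field) with one pass over entry.splitlines() that builds a first-wins dict keyed on the text before the first colon, followed by four dict lookups.
import Mathlib
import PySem

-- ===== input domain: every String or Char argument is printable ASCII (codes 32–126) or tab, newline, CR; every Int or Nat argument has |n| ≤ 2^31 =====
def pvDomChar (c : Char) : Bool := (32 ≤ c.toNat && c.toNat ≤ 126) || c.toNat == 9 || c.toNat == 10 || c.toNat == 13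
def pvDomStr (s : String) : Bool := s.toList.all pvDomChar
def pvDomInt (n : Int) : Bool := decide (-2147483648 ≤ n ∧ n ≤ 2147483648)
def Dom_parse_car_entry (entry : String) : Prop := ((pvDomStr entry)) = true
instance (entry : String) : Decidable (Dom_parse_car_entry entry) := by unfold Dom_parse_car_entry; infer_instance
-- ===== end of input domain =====

-- B replaces A's four repeated scans of entry.splitlines() with one pass that indexes the
-- lines by the text before the first ':' (first occurrence wins), then four dict lookups.


-- ===== PORT A =====
-- A's inner 'extract': scan entry.splitlines() for the first line starting with "<field>:".
-- Under the startswith guard line.split(":", 1) always has a second part, so the Python [1]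
-- (which would raise only on a missing index) is ported with pyGetD and an unreachable default.
def pvExtractGo (lines : List String) (field : String) : Option String :=
  match lines with
  | [] => none
  | line :: rest =>
    if PySem.Str.startswith line (field ++ ":") then
      some (PySem.Str.strip (PySem.List.pyGetD ((PySem.Str.splitMax? line ":" 1).getD []) 1 ""))
    else pvExtractGo rest field

def pvExtract (entry : String) (field : String) : Option String :=
  pvExtractGo (PySem.Str.splitlines entry) field

def parse_car_entry (entry : String) : List (String × Option String) :=
  [("model_name", pvExtract entry "Model"),
   ("category", pvExtract entry "Category"),
   ("price_range", pvExtract entry "Price Range"),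
   ("availability", pvExtract entry "Availability")]

-- ===== PORT B =====
-- hand port of line.partition(":") (single-char separator), exact: the pieces before/at/after
-- the FIRST ':' when present, else (line, "", "").
def pvPartitionColon (line : String) : String × String × String :=
  if ':' ∈ line.toList then
    (String.ofList (line.toList.takeWhile (· ≠ ':')), ":",
     String.ofList ((line.toList.dropWhile (· ≠ ':')).tail))
  else (line, "", "")

-- the body of B's single loop: index a line by its key unless the key is already present
def pvStep (d : PySem.Dict String String) (line : String) : PySem.Dict String String :=
  let p := pvPartitionColon line
  if p.2.1 ≠ "" ∧ d.contains p.1 = false then d.insert p.1 (PySem.Str.strip p.2.2) else d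

def parse_car_entry_alt (entry : String) : List (String × Option String) :=
  let index := (PySem.Str.splitlines entry).foldl pvStep PySem.Dict.empty
  [("model_name", index.get? "Model"),
   ("category", index.get? "Category"),
   ("price_range", index.get? "Price Range"),
   ("availability", index.get? "Availability")]

-- ===== PRECONDITION & SPEC =====
def Spec_parse_car_entry (entry : String) (out : List (String × Option String)) : Prop := out = parse_car_entry_alt entry
instance (entry : String) (out : List (String × Option String)) : Decidable (Spec_parse_car_entry entry out) := by unfold Spec_parse_car_entry; infer_instance

-- ===== CLAIM (what is proved, stated in full; the proofs are below) =====
def Claim_equal_parse_car_entry : Prop := ∀ (entry : String), Dom_parse_car_entry entry → Spec_parse_car_entry entry (parse_car_entry entry)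

-- ===== LEMMAS AND PROOFS =====

-- splitOnMax.go with maxsplit exhausted returns the rest as one piece
lemma pv_go_zero (sep : List Char) (fuel : Nat) (l cur : List Char) (acc : List (List Char)) :
    PySem.Chars.splitOnMax.go sep fuel 0 l cur acc = ((cur.reverse ++ l) :: acc).reverse := by
  cases fuel with
  | zero => rw [PySem.Chars.splitOnMax.go]
  | succ f => cases l with
    | nil => rw [PySem.Chars.splitOnMax.go]; simp; omega
    | cons c rest => rw [PySem.Chars.splitOnMax.go]; simp

-- splitOnMax.go on a single-char separator with maxsplit 1: split at the first ':'
lemma pv_go_one (fuel : Nat) (l cur : List Char) (h : l.length ≤ fuel) :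
    PySem.Chars.splitOnMax.go [':'] fuel 1 l cur [] =
      if ':' ∈ l then [cur.reverse ++ l.takeWhile (· ≠ ':'), (l.dropWhile (· ≠ ':')).tail]
      else [cur.reverse ++ l] := by
  induction fuel generalizing l cur with
  | zero =>
    have : l = [] := List.eq_nil_of_length_eq_zero (Nat.le_zero.mp h)
    subst this
    rw [PySem.Chars.splitOnMax.go]; simp
  | succ f ih =>
    cases l with
    | nil => rw [PySem.Chars.splitOnMax.go]; simp; omega
    | cons c rest =>
      rw [PySem.Chars.splitOnMax.go]
      by_cases hc : c = ':'
      · subst hc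
        simp [List.isPrefixOf, pv_go_zero]
      · have hp : List.isPrefixOf [':'] (c :: rest) = false := by
          simp [List.isPrefixOf]
          exact fun h => absurd h.symm hc
        rw [if_neg (by simp), if_neg (by simp [hp])]
        rw [ih rest (c :: cur) (by simpa using Nat.succ_le_succ_iff.mp h)]
        simp [hc, Ne.symm hc]

-- line.split(":", 1) characterised: split at the first ':' when present
lemma pv_splitColon (cs : List Char) :
    PySem.Chars.splitOnMax cs [':'] 1 =
      if ':' ∈ cs then [cs.takeWhile (· ≠ ':'), (cs.dropWhile (· ≠ ':')).tail] else [cs] := by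
  unfold PySem.Chars.splitOnMax
  rw [if_neg (by omega)]
  simpa using pv_go_one (cs.length + 1) cs [] (by omega)

-- startswith(field + ":") characterised by the partition key
lemma pv_prefix_colon_iff (k : List Char) (hk : ':' ∉ k) (cs : List Char) :
    (k ++ [':']) <+: cs ↔ (cs.takeWhile (· ≠ ':') = k ∧ ':' ∈ cs) := by
  induction k generalizing cs with
  | nil =>
    cases cs with
    | nil => simp
    | cons c rest =>
      by_cases hc : c = ':'
      · subst hc; simp [List.cons_prefix_cons]
      · simp [List.cons_prefix_cons, hc, Ne.symm hc]
  | cons a k' ih =>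
    have ha : a ≠ ':' := fun h => hk (by simp [h])
    have hk' : ':' ∉ k' := fun h => hk (by simp [h])
    cases cs with
    | nil => simp
    | cons c rest =>
      by_cases hc : c = a
      · subst hc
        simp [List.cons_prefix_cons, ha, ih hk' rest, Ne.symm ha]
      · constructor
        · intro h
          exact absurd (List.cons_prefix_cons.mp h).1.symm hc
        · rintro ⟨h1, -⟩
          by_cases hcc : c = ':'
          · subst hcc; simp at h1
          · rw [List.takeWhile_cons, if_pos (by simpa using hcc)] at h1
            exact absurd (List.cons.injEq _ _ _ _ ▸ h1).1 hc

-- the invariant of B's loop: looking up k in the folded index is A's first-match scan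
lemma pv_lookup_foldl (lines : List String) (d : PySem.Dict String String) (k : String)
    (hk : ':' ∉ k.toList) :
    (lines.foldl pvStep d).get? k = (d.get? k).or (pvExtractGo lines k) := by
  induction lines generalizing d with
  | nil => simp [pvExtractGo]
  | cons line rest ih =>
    have hsw : PySem.Str.startswith line (k ++ ":") =
        PySem.Chars.startswith line.toList (k.toList ++ [':']) := by
      unfold PySem.Str.startswith
      rw [String.toList_append]
      rfl
    simp only [List.foldl_cons, pvExtractGo]
    by_cases hmem : ':' ∈ line.toList
    · by_cases hkey : line.toList.takeWhile (· ≠ ':') = k.toList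
      · -- the line's key is exactly k: A matches, B inserts (if the key is still absent)
        have hs : PySem.Str.startswith line (k ++ ":") = true := by
          rw [hsw, PySem.Chars.startswith]
          exact List.isPrefixOf_iff_prefix.mpr ((pv_prefix_colon_iff _ hk _).mpr ⟨hkey, hmem⟩)
        rw [hs, if_pos rfl]
        have hval : PySem.Str.strip (PySem.List.pyGetD
            ((PySem.Str.splitMax? line ":" 1).getD []) 1 "") =
            PySem.Str.strip (String.ofList ((line.toList.dropWhile (· ≠ ':')).tail)) := by
          have h2 : PySem.Str.splitMax? line ":" 1 =
              some ((PySem.Chars.splitOnMax line.toList [':'] 1).map String.ofList) := rfl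
          rw [h2, pv_splitColon, if_pos hmem]
          simp [PySem.List.pyGetD, PySem.List.pyGet?, PySem.List.pyIdx?]
        by_cases hcont : d.contains k = false
        · have hstep : pvStep d line = d.insert k
              (PySem.Str.strip (String.ofList ((line.toList.dropWhile (· ≠ ':')).tail))) := by
            simp only [pvStep, pvPartitionColon, if_pos hmem, hkey, String.ofList_toList]
            rw [if_pos ⟨by decide, hcont⟩]
          have hnone : d.get? k = none := (PySem.Dict.get?_eq_none_iff_contains d k).mpr hcont
          rw [hstep, ih, PySem.Dict.get?_insert_self, hnone, hval]
          simp
        · have hT : d.contains k = true := by simpa using hcont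
          have hstep : pvStep d line = d := by
            simp only [pvStep, pvPartitionColon, if_pos hmem, hkey, String.ofList_toList]
            rw [if_neg (by simp [hT])]
          have hsome : (d.get? k).isSome := by
            rw [← PySem.Dict.contains_eq_isSome_get?, hT]
          rcases Option.isSome_iff_exists.mp hsome with ⟨v, hv⟩
          rw [hstep, ih, hv]
          simp
      · -- the line has a key, but not k: A skips it, B's insert keeps k's binding
        have hs : PySem.Str.startswith line (k ++ ":") = false := by
          rw [hsw, PySem.Chars.startswith]
          simp only [Bool.eq_false_iff, ne_eq]
          intro h
          exact hkey ((pv_prefix_colon_iff _ hk _).mp (List.isPrefixOf_iff_prefix.mp h)).1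
        rw [hs, if_neg (by simp)]
        have hne : String.ofList (line.toList.takeWhile (· ≠ ':')) ≠ k := by
          intro h
          exact hkey (by simpa using congrArg String.toList h)
        have hstep : (pvStep d line).get? k = d.get? k := by
          simp only [pvStep, pvPartitionColon, if_pos hmem]
          split_ifs with h1
          · exact PySem.Dict.get?_insert_of_ne d _ (Ne.symm hne)
          · rfl
        rw [ih, hstep]
    · -- no ':' in the line: A's startswith is false, B leaves the dict unchanged
      have hs : PySem.Str.startswith line (k ++ ":") = false := by
        rw [hsw, PySem.Chars.startswith]
        simp only [Bool.eq_false_iff, ne_eq]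
        intro h
        exact hmem ((pv_prefix_colon_iff _ hk _).mp (List.isPrefixOf_iff_prefix.mp h)).2
      rw [hs, if_neg (by simp)]
      have hstep : pvStep d line = d := by
        simp [pvStep, pvPartitionColon, if_neg hmem]
      rw [hstep, ih]

lemma pv_field (entry : String) (k : String) (hk : ':' ∉ k.toList) :
    ((PySem.Str.splitlines entry).foldl pvStep PySem.Dict.empty).get? k = pvExtract entry k := by
  rw [pv_lookup_foldl _ _ _ hk, pvExtract]
  simp

-- ===== VERDICT (by name: the statement is the Claim_ definition above) =====
theorem parse_car_entry_spec : Claim_equal_parse_car_entry := by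
  intro entry _
  show parse_car_entry entry = parse_car_entry_alt entry
  simp only [parse_car_entry, parse_car_entry_alt]
  rw [pv_field entry "Model" (by decide), pv_field entry "Category" (by decide),
      pv_field entry "Price Range" (by decide), pv_field entry "Availability" (by decide)]
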